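-- pv_equiv track=rewrite | github.com/abcd-EGH/coding-test | Programmers/StackQueue/DevelopFunction.py | solution
-- ===== SOURCE A (Python) =====
-- def solution(progresses, speeds):
--     times = []
--     for progress, speed in zip(progresses, speeds):
--         if (100 - progress) % speed == 0:
--             times.append((100 - progress) / speed)
--         else:
--             times.append((100 - progress) // speed + 1)
--     answer = [1]
--     last_time = times[0]
--     for time_index in range(1, len(times)):
--         if last_time < times[time_index]:
--             answer.append(1)
--             last_time = times[time_index]
--         else:
--             answer[-1] += 1
--     return answer
-- ===== SOURCE B (Python) =====
-- def solution(progresses, speeds):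
--     days = [-((p - 100) // s) for p, s in zip(progresses, speeds)]
--     cuts = [i for i, d in enumerate(days) if all(x < d for x in days[:i])] + [len(days)]
--     return [b - a for a, b in zip(cuts, cuts[1:])]
-- ===== Notes on version B (the rewrite author's own statement) =====
-- stated objective: alternative
-- what changed: Instead of A's single incremental pass mutating answer[-1] with a last_time accumulator, B declaratively selects the group-boundary indices (positions whose day strictly exceeds every earlier day, checked against the whole prefix) plus the length sentinel, and returns the consecutive differences of that boundary list.
import Mathlib
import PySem

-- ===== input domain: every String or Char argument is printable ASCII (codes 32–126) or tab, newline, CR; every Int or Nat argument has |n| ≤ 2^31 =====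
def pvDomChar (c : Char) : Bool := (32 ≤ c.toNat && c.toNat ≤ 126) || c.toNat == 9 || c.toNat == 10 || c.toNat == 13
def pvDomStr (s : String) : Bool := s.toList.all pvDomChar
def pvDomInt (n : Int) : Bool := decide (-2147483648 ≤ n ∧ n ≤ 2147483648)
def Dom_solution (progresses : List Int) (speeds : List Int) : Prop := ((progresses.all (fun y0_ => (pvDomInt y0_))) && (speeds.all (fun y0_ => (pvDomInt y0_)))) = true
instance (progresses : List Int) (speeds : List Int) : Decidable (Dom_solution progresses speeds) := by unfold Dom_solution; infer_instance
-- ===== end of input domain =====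

-- B replaces A's incremental answer[-1] accumulator pass by a declarative computation:
-- the group boundaries are the indices whose day exceeds every earlier day (checked against
-- the whole prefix), and the answer is the list of consecutive differences of those boundaries.

-- ===== PORT A =====
-- A's second loop; answer is kept reversed so 'answer[-1] += 1' edits the head, reversed at the end.
def solutionLoopA : List Int → Int → List Int → List Int
  | [], _, acc => acc.reverse
  | t :: ts, last, acc =>
    if last < t then solutionLoopA ts t (1 :: acc)
    else solutionLoopA ts last (match acc with | h :: r => (h + 1) :: r | [] => [])

def solution (progresses : List Int) (speeds : List Int) : List Int :=
  -- '(100-p)/s' in the divisible branch is a Python float equal to the exact quotient; ported as that integer.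
  let times := (progresses.zip speeds).map (fun ps =>
    if PySem.Int.mod (100 - ps.1) ps.2 = 0 then PySem.Int.floordiv (100 - ps.1) ps.2
    else PySem.Int.floordiv (100 - ps.1) ps.2 + 1)
  match times with
  | [] => []                     -- unreachable under Pre_solution: Python raises IndexError at times[0]
  | t :: ts => solutionLoopA ts t [1]

-- ===== PORT B =====
-- '[b - a for a, b in zip(cuts, cuts[1:])]'
def diffsB (l : List Int) : List Int := (l.zip l.tail).map (fun p => p.2 - p.1)

def solution_alt (progresses : List Int) (speeds : List Int) : List Int :=
  let days := (progresses.zip speeds).map (fun ps => -(PySem.Int.floordiv (ps.1 - 100) ps.2))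
  -- 'enumerate(days)' is days.zipIdx (pairs (element, index)); 'days[:i]' is days.take i.
  let cuts : List Int :=
    ((days.zipIdx).filter (fun p => (days.take p.2).all (fun x => decide (x < p.1)))).map
      (fun p => ((p.2 : Nat) : Int)) ++ [((days.length : Nat) : Int)]
  diffsB cuts

-- ===== PRECONDITION & SPEC =====
-- Pre_ excludes exactly the inputs where A raises: empty input (IndexError at times[0])
-- and a zero speed among the zipped pairs (ZeroDivisionError).
def Pre_solution (progresses : List Int) (speeds : List Int) : Prop :=
  progresses ≠ [] ∧ speeds ≠ [] ∧ ∀ ps ∈ progresses.zip speeds, ps.2 ≠ 0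
instance (progresses : List Int) (speeds : List Int) : Decidable (Pre_solution progresses speeds) := by
  unfold Pre_solution; infer_instance
def pvWitness_solution : List Int × List Int := ([93, 30, 55], [1, 30, 5])

def Spec_solution (progresses : List Int) (speeds : List Int) (out : List Int) : Prop := out = solution_alt progresses speeds
instance (progresses : List Int) (speeds : List Int) (out : List Int) : Decidable (Spec_solution progresses speeds out) := by unfold Spec_solution; infer_instance

-- ===== CLAIM (what is proved, stated in full; the proofs are below) =====
def Claim_equal_solution : Prop := ∀ (progresses : List Int) (speeds : List Int), Dom_solution progresses speeds → Pre_solution progresses speeds → Spec_solution progresses speeds (solution progresses speeds)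

-- ===== LEMMAS AND PROOFS =====

-- A's per-element "days" value equals B's ceiling division, for nonzero speed.
theorem ceil_elem_pos (a b : Int) (hb : 0 < b) :
    (if PySem.Int.mod a b = 0 then PySem.Int.floordiv a b else PySem.Int.floordiv a b + 1)
      = -(PySem.Int.floordiv (-a) b) := by
  have h1 := PySem.Int.floordiv_mul_add_mod a b
  have hr0 := PySem.Int.mod_nonneg (a := a) hb
  have hrb := PySem.Int.mod_lt (a := a) hb
  split_ifs with h
  · exact ((PySem.Int.neg_floordiv_neg_eq_iff_of_pos hb).mpr ⟨by nlinarith, by nlinarith⟩).symm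
  · have hr : 0 < PySem.Int.mod a b := lt_of_le_of_ne hr0 (Ne.symm h)
    exact ((PySem.Int.neg_floordiv_neg_eq_iff_of_pos hb).mpr ⟨by nlinarith, by nlinarith⟩).symm

theorem ceil_elem_eq (a b : Int) (hb : b ≠ 0) :
    (if PySem.Int.mod a b = 0 then PySem.Int.floordiv a b else PySem.Int.floordiv a b + 1)
      = -(PySem.Int.floordiv (-a) b) := by
  rcases lt_or_gt_of_ne hb with hneg | hpos
  · have h := ceil_elem_pos (-a) (-b) (by omega)
    have hm : PySem.Int.mod a b = -(PySem.Int.mod (-a) (-b)) := by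
      simp
    have hf : PySem.Int.floordiv a b = PySem.Int.floordiv (-a) (-b) := by
      simp [(PySem.Int.floordiv_neg_neg (-a) (-b)).symm]
    have hf2 : PySem.Int.floordiv (-a) b = PySem.Int.floordiv a (-b) := by
      simpa using PySem.Int.floordiv_neg_neg a (-b)
    rw [hm, hf, hf2]
    simpa [neg_eq_zero] using h
  · exact ceil_elem_pos a b hpos

-- proof-only: the positions (starting at i) of the strict running-max records of the list
def cutsRel : Int → List Int → Int → List Int
  | _, [], _ => []
  | last, t :: ts, i => if last < t then i :: cutsRel t ts (i + 1) else cutsRel last ts (i + 1)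

theorem diffsB_cons2 (a b : Int) (r : List Int) :
    diffsB (a :: b :: r) = (b - a) :: diffsB (b :: r) := by
  simp [diffsB]

-- A's accumulator loop equals the consecutive differences of the record positions.
theorem loopA_eq_diffs (ts : List Int) (last c i : Int) (acc : List Int) :
    solutionLoopA ts last (c :: acc)
      = acc.reverse ++ diffsB ((i - c) :: (cutsRel last ts i ++ [i + ts.length])) := by
  induction ts generalizing last c i acc with
  | nil =>
    simp [solutionLoopA, cutsRel, diffsB]
  | cons t ts ih =>
    by_cases h : last < t
    · rw [show (cutsRel last (t :: ts) i) = i :: cutsRel t ts (i + 1) from by simp [cutsRel, h]]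
      rw [List.cons_append, diffsB_cons2]
      have := ih (last := t) (c := 1) (i := i + 1) (acc := c :: acc)
      rw [show ((i : Int) + 1 - 1) = i from by ring] at this
      rw [show ((i : Int) + 1 + ts.length) = i + (t :: ts).length from by simp; ring] at this
      simp [solutionLoopA, h, this]
    · rw [show (cutsRel last (t :: ts) i) = cutsRel last ts (i + 1) from by simp [cutsRel, h]]
      have := ih (last := last) (c := c + 1) (i := i + 1) (acc := acc)
      rw [show ((i : Int) + 1 - (c + 1)) = i - c from by ring] at this
      rw [show ((i : Int) + 1 + ts.length) = i + (t :: ts).length from by simp; ring] at this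
      simp [solutionLoopA, h, this]

-- B's prefix-dominance filter selects exactly the running-max record positions.
theorem filterB_eq_cutsRel (ds : List Int) (pre : List Int) (last : Int)
    (hinv : ∀ x : Int, (pre.all (fun y => decide (y < x)) = true) ↔ last < x) :
    (((ds.zipIdx pre.length).filter
        (fun p => ((pre ++ ds).take p.2).all (fun x => decide (x < p.1)))).map
      (fun p => ((p.2 : Nat) : Int)))
      = cutsRel last ds (pre.length : Int) := by
  induction ds generalizing pre last with
  | nil => simp [cutsRel]
  | cons t ts ih =>
    rw [List.zipIdx_cons, List.filter_cons]
    have htake : ((pre ++ t :: ts).take pre.length) = pre := List.take_left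
    have hcond : (((pre ++ t :: ts).take pre.length).all (fun x => decide (x < t)) = true)
        ↔ last < t := by rw [htake]; exact hinv t
    have hsplit : pre ++ t :: ts = (pre ++ [t]) ++ ts := List.append_cons pre t ts
    have hlen : (pre ++ [t]).length = pre.length + 1 := by simp
    by_cases h : last < t
    · have hceq : (((pre ++ t :: ts).take (t, pre.length).2).all
          (fun x => decide (x < (t, pre.length).1))) = true := by
        simp only [htake]
        exact (hinv t).mpr h
      have hinv' : ∀ x : Int, ((pre ++ [t]).all (fun y => decide (y < x)) = true) ↔ t < x := by
        intro x
        simp only [List.all_append, List.all_cons, List.all_nil, Bool.and_true, Bool.and_eq_true,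
          decide_eq_true_eq]
        constructor
        · rintro ⟨-, hx⟩; exact hx
        · intro hx; exact ⟨(hinv x).mpr (lt_trans h hx), hx⟩
      have := ih (pre := pre ++ [t]) (last := t) hinv'
      rw [hlen] at this
      rw [if_pos hceq, List.map_cons, hsplit, this]
      rw [show cutsRel last (t :: ts) (pre.length : Int)
            = (pre.length : Int) :: cutsRel t ts ((pre.length : Int) + 1) from by
          simp [cutsRel, h]]
      push_cast
      simp
    · have hinv' : ∀ x : Int, ((pre ++ [t]).all (fun y => decide (y < x)) = true) ↔ last < x := by
        intro x
        simp only [List.all_append, List.all_cons, List.all_nil, Bool.and_true, Bool.and_eq_true,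
          decide_eq_true_eq]
        constructor
        · rintro ⟨hx, -⟩; exact (hinv x).mp (by simpa using hx)
        · intro hx; exact ⟨(hinv x).mpr hx, lt_of_le_of_lt (not_lt.mp h) hx⟩
      have hceqF : ¬ ((((pre ++ t :: ts).take (t, pre.length).2).all
          (fun x => decide (x < (t, pre.length).1))) = true) := by
        simp only [htake]
        exact fun hb => h ((hinv t).mp hb)
      have := ih (pre := pre ++ [t]) (last := last) hinv'
      rw [hlen] at this
      rw [if_neg hceqF, hsplit, this]
      rw [show cutsRel last (t :: ts) (pre.length : Int)
            = cutsRel last ts ((pre.length : Int) + 1) from by simp [cutsRel, h]]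
      push_cast
      simp

-- ===== VERDICT (by name: the statement is the Claim_ definition above) =====
theorem solution_spec : Claim_equal_solution := by
  intro progresses speeds _ hpre
  obtain ⟨hp, hs, hz⟩ := hpre
  show solution progresses speeds = solution_alt progresses speeds
  unfold solution solution_alt
  have hmap : (progresses.zip speeds).map (fun ps =>
      if PySem.Int.mod (100 - ps.1) ps.2 = 0 then PySem.Int.floordiv (100 - ps.1) ps.2
      else PySem.Int.floordiv (100 - ps.1) ps.2 + 1)
      = (progresses.zip speeds).map (fun ps => -(PySem.Int.floordiv (ps.1 - 100) ps.2)) := by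
    apply List.map_congr_left
    intro ps hmem
    have h := ceil_elem_eq (100 - ps.1) ps.2 (hz ps hmem)
    simpa [show -(100 - ps.1) = ps.1 - 100 by ring] using h
  rw [hmap]
  cases hlist : (progresses.zip speeds).map (fun ps => -(PySem.Int.floordiv (ps.1 - 100) ps.2)) with
  | nil =>
    simp at hlist
    rcases hlist with h | h
    · exact absurd h hp
    · exact absurd h hs
  | cons d ds =>
    have hB : (((d :: ds).zipIdx).filter
          (fun p => ((d :: ds).take p.2).all (fun x => decide (x < p.1)))).map
          (fun p => ((p.2 : Nat) : Int))
        = (0 : Int) :: cutsRel d ds 1 := by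
      rw [List.zipIdx_cons, List.filter_cons]
      have := filterB_eq_cutsRel ds [d] d (by intro x; simp)
      simp only [List.length_cons, List.length_nil, List.singleton_append] at this
      simp only [List.take_zero, List.all_nil, if_pos, List.map_cons, this]
      norm_num
    dsimp only
    rw [hB]
    have hA := loopA_eq_diffs ds d 1 1 []
    rw [show ((1 : Int) - 1) = 0 from by ring] at hA
    rw [hA]
    rw [show (1 + (ds.length : Int)) = (ds.length : Int) + 1 from by ring]
    simp
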